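-- pv_equiv track=rewrite | github.com/andrearastelli/AOC2021 | src/AOC2021/day_07/p1.py | fuel_to_optimal_position
-- ===== SOURCE A (Python) =====
-- from collections import Counter
--
-- def fuel_to_optimal_position(input_data):
--     input_data_counter = Counter(input_data)
--
--     # array containing all the distances between each point from the min and
--     # max of the input data
--     distances = [
--         sum(
--             abs(distance-position)*quantity
--             for position, quantity in input_data_counter.items()
--         )
--         # Iterate over all the distances
--         for distance in range(min(input_data), max(input_data))
--     ]
--
--     return distances
-- ===== SOURCE B (Python) =====
-- def fuel_to_optimal_position(input_data):
--     lo = min(input_data)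
--     hi = max(input_data)
--     n = len(input_data)
--     cnt = {}
--     for p in input_data:
--         cnt[p] = cnt.get(p, 0) + 1
--     cost = sum(p - lo for p in input_data)
--     below = 0
--     res = []
--     for d in range(lo, hi):
--         below += cnt.get(d, 0)
--         res.append(cost)
--         cost += 2 * below - n
--     return res
-- ===== Notes on version B (the rewrite author's own statement) =====
-- stated objective: faster
-- what changed: Instead of re-summing |d-p|*count over all distinct positions for every d in the range, B computes the cost at the minimum once and sweeps the range updating the cost incrementally by 2*(#points<=d)-n, maintaining the below-count from an occurrence dict.
import Mathlib
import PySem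

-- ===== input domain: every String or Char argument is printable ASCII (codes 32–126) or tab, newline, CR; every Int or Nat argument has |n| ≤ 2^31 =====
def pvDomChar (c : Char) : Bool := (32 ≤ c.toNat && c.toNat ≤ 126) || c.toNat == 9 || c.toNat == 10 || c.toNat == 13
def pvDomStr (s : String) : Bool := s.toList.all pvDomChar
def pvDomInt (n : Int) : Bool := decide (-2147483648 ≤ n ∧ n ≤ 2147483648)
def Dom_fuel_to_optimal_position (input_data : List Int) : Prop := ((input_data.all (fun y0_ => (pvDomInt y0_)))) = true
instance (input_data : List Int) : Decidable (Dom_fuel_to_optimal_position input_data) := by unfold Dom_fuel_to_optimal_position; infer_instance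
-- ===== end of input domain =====

-- B replaces A's per-distance full re-summation over the Counter by a single incremental
-- sweep (cost(d+1) = cost(d) + 2*(#points ≤ d) - n); objective: faster (asymptotic).

-- ===== PORT A =====
def fuel_to_optimal_position (input_data : List Int) : List Int :=
  match PySem.List.min? input_data (fun x => x), PySem.List.max? input_data (fun x => x) with
  | some lo, some hi =>
      let cnt := PySem.Dict.counter input_data
      (PySem.List.pyRange lo hi 1).map (fun distance =>
        (cnt.items.map (fun pq => |distance - pq.1| * pq.2)).sum)
  | _, _ => []   -- unreachable under Pre_ (Python's min() raises ValueError on the empty list)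

-- ===== PORT B =====
def fuel_to_optimal_position_alt (input_data : List Int) : List Int :=
  match PySem.List.min? input_data (fun x => x) with
  | none => []   -- unreachable under Pre_ (min of the empty list raises)
  | some lo =>
    match PySem.List.max? input_data (fun x => x) with
    | none => []   -- unreachable under Pre_
    | some hi =>
      let n : Int := input_data.length
      let cnt := input_data.foldl (fun d p => d.insert p (d.getD p 0 + 1)) PySem.Dict.empty
      let cost0 : Int := (input_data.map (fun p => p - lo)).sum
      ((PySem.List.pyRange lo hi 1).foldl
        (fun (st : List Int × Int × Int) d =>
          let below := st.2.1 + cnt.getD d 0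
          (st.1 ++ [st.2.2], below, st.2.2 + 2 * below - n))
        ([], 0, cost0)).1

-- ===== PRECONDITION & SPEC =====
-- Pre_ excludes exactly the empty list, on which Python's min() raises ValueError (in both A and B).
def Pre_fuel_to_optimal_position (input_data : List Int) : Prop := input_data ≠ []
instance (input_data : List Int) : Decidable (Pre_fuel_to_optimal_position input_data) := by unfold Pre_fuel_to_optimal_position; infer_instance
def pvWitness_fuel_to_optimal_position : List Int := [1, 3, 0, 3]

def Spec_fuel_to_optimal_position (input_data : List Int) (out : List Int) : Prop := out = fuel_to_optimal_position_alt input_data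
instance (input_data : List Int) (out : List Int) : Decidable (Spec_fuel_to_optimal_position input_data out) := by unfold Spec_fuel_to_optimal_position; infer_instance

-- ===== CLAIM (what is proved, stated in full; the proofs are below) =====
def Claim_equal_fuel_to_optimal_position : Prop := ∀ (input_data : List Int), Dom_fuel_to_optimal_position input_data → Pre_fuel_to_optimal_position input_data → Spec_fuel_to_optimal_position input_data (fuel_to_optimal_position input_data)

-- ===== LEMMAS AND PROOFS =====

-- the mathematical cost function both programs compute at each range point
def pvCost (xs : List Int) (d : Int) : Int := (xs.map (fun p => |d - p|)).sum

-- summing "if k = x then f k else 0" over a nodup list containing x picks out f x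
lemma pv_sum_pick (f : Int → Int) (x : Int) :
    ∀ (ks : List Int), ks.Nodup → x ∈ ks →
      (ks.map (fun k => if k = x then f k else 0)).sum = f x := by
  intro ks
  induction ks with
  | nil => intro _ h; cases h
  | cons k t ih =>
      intro hnd hx
      rcases List.nodup_cons.mp hnd with ⟨hk, hnt⟩
      by_cases hkx : k = x
      · subst hkx
        have : (t.map (fun k' => if k' = k then f k' else 0)).sum = 0 := by
          rw [List.sum_eq_zero]
          intro y hy
          rcases List.mem_map.mp hy with ⟨z, hz, rfl⟩
          have : z ≠ k := fun h => hk (h ▸ hz)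
          simp [this]
        simp [this]
      · have hx' : x ∈ t := by
          rcases hx with _ | h
          · exact absurd rfl hkx
          · assumption
        simp [hkx, ih hnt hx']

-- weighted sum over any nodup key list covering xs equals the plain sum over xs
lemma pv_sum_count (f : Int → Int) :
    ∀ (xs ks : List Int), ks.Nodup → (∀ x ∈ xs, x ∈ ks) →
      (ks.map (fun k => |f k| * (xs.count k : Int))).sum = (xs.map (fun p => |f p|)).sum := by
  intro xs
  induction xs with
  | nil => intro ks _ _; simp
  | cons x t ih =>
      intro ks hnd hcov
      have hx : x ∈ ks := hcov x (List.mem_cons_self ..)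
      have hcov' : ∀ y ∈ t, y ∈ ks := fun y hy => hcov y (List.mem_cons_of_mem _ hy)
      have hsplit : ∀ k : Int, ((x :: t).count k : Int)
          = (t.count k : Int) + (if k = x then 1 else 0) := by
        intro k
        by_cases h : k = x <;> simp [List.count_cons, h] <;> omega
      calc (ks.map (fun k => |f k| * ((x :: t).count k : Int))).sum
          = (ks.map (fun k => |f k| * (t.count k : Int) + (if k = x then |f k| else 0))).sum := by
            apply congrArg
            apply List.map_congr_left
            intro k _
            rw [hsplit k]
            by_cases h : k = x <;> simp [h] <;> ring
        _ = (ks.map (fun k => |f k| * (t.count k : Int))).sum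
              + (ks.map (fun k => if k = x then |f k| else 0)).sum := by
            rw [← List.sum_map_add]
        _ = (t.map (fun p => |f p|)).sum + |f x| := by
            rw [ih ks hnd hcov', pv_sum_pick (fun k => |f k|) x ks hnd hx]
        _ = ((x :: t).map (fun p => |f p|)).sum := by simp; ring

-- A's per-distance Counter sum equals the plain sum over the data
lemma pv_A_elem (xs : List Int) (d : Int) :
    ((PySem.Dict.counter xs).items.map (fun pq => |d - pq.1| * pq.2)).sum = pvCost xs d := by
  rw [PySem.Dict.items_counter, List.map_map]
  have := pv_sum_count (fun p => d - p) xs (PySem.Set.ofList xs)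
    (PySem.Set.nodup_ofList xs)
    (fun x hx => by simpa [PySem.Set.mem_ofList] using hx)
  simpa [Function.comp, pvCost] using this

-- counting p < d+1 splits as p < d plus p = d
lemma pv_countP_succ (xs : List Int) (d : Int) :
    (xs.countP (fun p => decide (p < d + 1)) : Int)
      = (xs.countP (fun p => decide (p < d)) : Int) + (xs.count d : Int) := by
  induction xs with
  | nil => simp
  | cons p t ih =>
      simp only [List.countP_cons, List.count_cons]
      rcases lt_trichotomy p d with h | h | h
      · rw [decide_eq_true (show p < d + 1 by omega), decide_eq_true h,
            show (p == d) = false from by simp; omega]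
        simp only [if_true, Bool.false_eq_true, if_false]
        push_cast; omega
      · subst h
        rw [decide_eq_true (show p < p + 1 by omega), decide_eq_false (show ¬ p < p by omega),
            show (p == p) = true from by simp]
        simp only [if_true, Bool.false_eq_true, if_false]
        push_cast; omega
      · rw [decide_eq_false (show ¬ p < d + 1 by omega), decide_eq_false (show ¬ p < d by omega),
            show (p == d) = false from by simp; omega]
        simp only [Bool.false_eq_true, if_false]
        push_cast; omega

-- the incremental cost update B performs at each step
lemma pv_cost_step (xs : List Int) (d : Int) :
    pvCost xs (d + 1)
      = pvCost xs d + 2 * (xs.countP (fun p => decide (p < d + 1)) : Int) - xs.length := by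
  induction xs with
  | nil => simp [pvCost]
  | cons p t ih =>
      simp only [pvCost, List.map_cons, List.sum_cons, List.countP_cons, List.length_cons] at *
      rcases le_or_gt p d with h | h
      · rw [abs_of_nonneg (show (0:Int) ≤ d + 1 - p by omega),
            abs_of_nonneg (show (0:Int) ≤ d - p by omega),
            decide_eq_true (show p < d + 1 by omega), ih]
        simp only [if_true]
        push_cast; omega
      · rw [abs_of_nonpos (show d + 1 - p ≤ (0:Int) by omega),
            abs_of_nonpos (show d - p ≤ (0:Int) by omega),
            decide_eq_false (show ¬ p < d + 1 by omega), ih]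
        simp only [Bool.false_eq_true, if_false]
        push_cast; omega

-- B's sweep over the remaining range produces exactly the costs of that range
lemma pv_loopB (xs : List Int) (hi : Int) :
    ∀ (k : Nat) (d : Int) (res : List Int), (hi - d).toNat = k →
      ((PySem.List.pyRange d hi 1).foldl
        (fun (st : List Int × Int × Int) e =>
          let below := st.2.1 + (PySem.Dict.counter xs).getD e 0
          (st.1 ++ [st.2.2], below, st.2.2 + 2 * below - (xs.length : Int)))
        (res, (xs.countP (fun p => decide (p < d)) : Int), pvCost xs d)).1
      = res ++ (PySem.List.pyRange d hi 1).map (pvCost xs) := by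
  intro k
  induction k with
  | zero =>
      intro d res h
      rw [PySem.List.pyRange_one_eq_nil (by omega)]
      simp
  | succ n ih =>
      intro d res h
      have hd : d < hi := by omega
      rw [PySem.List.pyRange_one_cons hd]
      simp only [List.foldl_cons, List.map_cons]
      have hbelow : (xs.countP (fun p => decide (p < d)) : Int) + (PySem.Dict.counter xs).getD d 0
          = (xs.countP (fun p => decide (p < d + 1)) : Int) := by
        rw [PySem.Dict.getD_counter, pv_countP_succ]
      have hcost : pvCost xs d
            + 2 * ((xs.countP (fun p => decide (p < d)) : Int) + (PySem.Dict.counter xs).getD d 0)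
            - (xs.length : Int)
          = pvCost xs (d + 1) := by
        rw [hbelow, pv_cost_step]
      calc ((PySem.List.pyRange (d + 1) hi 1).foldl
              (fun (st : List Int × Int × Int) e =>
                let below := st.2.1 + (PySem.Dict.counter xs).getD e 0
                (st.1 ++ [st.2.2], below, st.2.2 + 2 * below - (xs.length : Int)))
              (res ++ [pvCost xs d],
               (xs.countP (fun p => decide (p < d)) : Int) + (PySem.Dict.counter xs).getD d 0,
               pvCost xs d
                 + 2 * ((xs.countP (fun p => decide (p < d)) : Int) + (PySem.Dict.counter xs).getD d 0)
                 - (xs.length : Int))).1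
          = ((PySem.List.pyRange (d + 1) hi 1).foldl
              (fun (st : List Int × Int × Int) e =>
                let below := st.2.1 + (PySem.Dict.counter xs).getD e 0
                (st.1 ++ [st.2.2], below, st.2.2 + 2 * below - (xs.length : Int)))
              (res ++ [pvCost xs d],
               (xs.countP (fun p => decide (p < d + 1)) : Int),
               pvCost xs (d + 1))).1 := by rw [hcost, hbelow]
        _ = (res ++ [pvCost xs d]) ++ (PySem.List.pyRange (d + 1) hi 1).map (pvCost xs) :=
              ih (d + 1) (res ++ [pvCost xs d]) (by omega)
        _ = res ++ pvCost xs d :: (PySem.List.pyRange (d + 1) hi 1).map (pvCost xs) := by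
              simp

-- ===== VERDICT (by name: the statement is the Claim_ definition above) =====
theorem fuel_to_optimal_position_spec : Claim_equal_fuel_to_optimal_position := by
  intro xs _ hpre
  unfold Spec_fuel_to_optimal_position fuel_to_optimal_position fuel_to_optimal_position_alt
  cases h1 : PySem.List.min? xs (fun x => x) with
  | none => exact absurd ((PySem.List.min?_eq_none_iff xs (fun x => x)).mp h1) hpre
  | some lo =>
    cases h2 : PySem.List.max? xs (fun x => x) with
    | none => exact absurd ((PySem.List.max?_eq_none_iff xs (fun x => x)).mp h2) hpre
    | some hi =>
      simp only
      have hmin : ∀ p ∈ xs, lo ≤ p := PySem.List.min?_isMin h1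
      -- A's list is the list of costs over the range
      have hA : (PySem.List.pyRange lo hi 1).map (fun distance =>
            ((PySem.Dict.counter xs).items.map (fun pq => |distance - pq.1| * pq.2)).sum)
          = (PySem.List.pyRange lo hi 1).map (pvCost xs) :=
        List.map_congr_left (fun d _ => pv_A_elem xs d)
      -- B's starting state is the invariant state at lo
      have hcnt : xs.foldl (fun d p => d.insert p (d.getD p 0 + 1)) PySem.Dict.empty
          = PySem.Dict.counter xs := PySem.Dict.foldl_insert_getD_add_one_eq_counter xs
      have hzero : (0 : Int) = (xs.countP (fun p => decide (p < lo)) : Int) := by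
        rw [List.countP_eq_zero.mpr (fun p hp => by
          simpa using not_lt.mpr (hmin p hp))]
        simp
      have hcost0 : (xs.map (fun p => p - lo)).sum = pvCost xs lo := by
        unfold pvCost
        apply congrArg
        apply List.map_congr_left
        intro p hp
        rw [abs_of_nonpos (by have := hmin p hp; omega)]
        ring
      have h := pv_loopB xs hi (hi - lo).toNat lo [] rfl
      rw [← hzero, ← hcost0] at h
      simp only [List.nil_append] at h
      rw [hA, hcnt]
      exact h.symm
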